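-- pv_equiv track=rewrite | github.com/lovepettersson/LogicalFusions | testing.py | adaptive_coeff_and_weigth
-- ===== SOURCE A (Python) =====
-- def adaptive_coeff_and_weigth(coeff_list):
--     # P_S = 1, P_X = 2, P_Z = 3, P_L = 4
--     # P_X_1, P_X_123,P_X_1231
--     weight_dict = {}
--     for cf in coeff_list:
--         qbit = []
--         for key in cf.keys():
--             seq_numb = ''.join(str(x) for x in qbit)
--             if seq_numb not in weight_dict.keys():
--                 weight_dict[seq_numb] = [0, 0]
--             if cf[key] == "P_S":
--                 qbit.append(1)
--             elif cf[key] == "P_X":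
--                 weight_dict[seq_numb][1] += 1
--                 qbit.append(2)
--             elif cf[key] == "P_Z":
--                 weight_dict[seq_numb][0] += 1
--                 qbit.append(3)
--             elif cf[key] == "P_L":
--                 qbit.append(4)
--         weight_dict.pop('', None)
--     return weight_dict
-- ===== SOURCE B (Python) =====
-- def adaptive_coeff_and_weigth(coeff_list):
--     # Staged pipeline instead of A's single interleaved dict-mutating scan:
--     # (1) flatten everything into one global event stream (prefix-key, axis),
--     # (2) collect the distinct non-empty keys in first-occurrence order,
--     # (3) build the result in one comprehension by counting events per key.
--     NUM = {"P_S": "1", "P_X": "2", "P_Z": "3", "P_L": "4"}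
--     AXIS = {"P_Z": 0, "P_X": 1}
--     events = []
--     for cf in coeff_list:
--         prefixes = []
--         p = ''
--         for v in cf.values():
--             prefixes.append(p)
--             p += NUM.get(v, '')
--         events += list(zip(prefixes, (AXIS.get(v) for v in cf.values())))
--     order = []
--     seen = set()
--     for k, _ in events:
--         if k != '' and k not in seen:
--             seen.add(k)
--             order.append(k)
--     return {k: [sum(1 for e, ax in events if e == k and ax == 0),
--                 sum(1 for e, ax in events if e == k and ax == 1)]
--             for k in order}
-- ===== Notes on version B (the rewrite author's own statement) =====
-- stated objective: alternative
-- what changed: B replaces A's single interleaved scan that mutates a shared dict entry-by-entry with a staged pipeline: it first flattens all coeff dicts into one global (prefix-key, axis) event stream, then collects the distinct non-empty keys in first-occurrence order, and finally builds the whole result in one comprehension by counting the Z/X events per key; it trades A's incremental in-place accumulation for global counting, which rescans the event stream per key.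
import Mathlib
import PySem

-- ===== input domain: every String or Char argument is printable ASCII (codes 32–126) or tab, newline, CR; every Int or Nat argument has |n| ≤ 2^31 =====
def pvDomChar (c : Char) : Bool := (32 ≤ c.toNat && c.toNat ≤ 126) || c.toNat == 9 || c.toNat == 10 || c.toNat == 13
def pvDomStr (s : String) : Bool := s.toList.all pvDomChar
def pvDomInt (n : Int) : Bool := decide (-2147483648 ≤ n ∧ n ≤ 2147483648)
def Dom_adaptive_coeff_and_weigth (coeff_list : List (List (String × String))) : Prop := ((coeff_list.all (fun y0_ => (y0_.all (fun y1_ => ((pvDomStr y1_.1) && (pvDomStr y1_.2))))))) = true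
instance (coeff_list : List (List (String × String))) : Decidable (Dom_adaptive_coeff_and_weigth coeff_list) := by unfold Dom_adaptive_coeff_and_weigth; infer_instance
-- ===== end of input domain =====

-- B replaces A's single interleaved dict-mutating scan by a staged pipeline: flatten all dicts
-- into one global (prefix-key, axis) event stream, collect the distinct non-empty keys in
-- first-occurrence order, then build the result by counting the events per key (alternative
-- decomposition, not claimed faster).

-- ===== PORT A =====
-- ''.join(str(x) for x in qbit)
def pvJoin (qbit : List Int) : String :=
  (qbit.map PySem.Int.toStr).foldl (fun a b => a ++ b) ""

-- the body of A's inner loop, as a function of the current value v = cf[key]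
def pvAStep (st : PySem.Dict String (Int × Int) × List Int) (v : String) :
    PySem.Dict String (Int × Int) × List Int :=
  let wd := st.1
  let qbit := st.2
  let seq := pvJoin qbit
  -- weight_dict[seq_numb] = [0,0] if absent; the fixed two-slot list is modelled as Int × Int
  let wd := if wd.contains seq then wd else wd.insert seq (0, 0)
  if v = "P_S" then (wd, qbit ++ [1])
  else if v = "P_X" then (wd.modify seq (0, 0) (fun p => (p.1, p.2 + 1)), qbit ++ [2])
  else if v = "P_Z" then (wd.modify seq (0, 0) (fun p => (p.1 + 1, p.2)), qbit ++ [3])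
  else if v = "P_L" then (wd, qbit ++ [4])
  else (wd, qbit)

def adaptive_coeff_and_weigth (coeff_list : List (List (String × String))) : List (String × List Int) :=
  let wd := coeff_list.foldl (fun wd cf =>
    let d := PySem.Dict.ofList cf
    let st := d.keys.foldl (fun st key => pvAStep st (d.getD key "")) (wd, ([] : List Int))
    st.1.erase "") PySem.Dict.empty
  wd.items.map (fun p => (p.1, [p.2.1, p.2.2]))

-- ===== PORT B =====
-- NUM = {"P_S": "1", "P_X": "2", "P_Z": "3", "P_L": "4"}
def pvNUM : PySem.Dict String String :=
  PySem.Dict.ofList [("P_S", "1"), ("P_X", "2"), ("P_Z", "3"), ("P_L", "4")]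
-- AXIS = {"P_Z": 0, "P_X": 1}
def pvAXIS : PySem.Dict String Int :=
  PySem.Dict.ofList [("P_Z", 0), ("P_X", 1)]

-- pass 1: the global event stream (prefix-key, axis)
def pvEvents (coeff_list : List (List (String × String))) : List (String × Option Int) :=
  coeff_list.foldl (fun ev cf =>
    let vals := (PySem.Dict.ofList cf).values
    let pr := vals.foldl (fun (st : List String × String) v =>
        (st.1 ++ [st.2], st.2 ++ pvNUM.getD v "")) (([] : List String), "")
    ev ++ pr.1.zip (vals.map pvAXIS.get?)) []

-- pass 2: distinct non-empty keys in first-occurrence order (list `order` + set `seen`)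
def pvOrder (events : List (String × Option Int)) : List String :=
  (events.foldl (fun (st : List String × PySem.Set String) e =>
      if e.1 ≠ "" ∧ PySem.Set.contains st.2 e.1 = false then
        (st.1 ++ [e.1], PySem.Set.add st.2 e.1)
      else st)
    (([] : List String), (PySem.Set.empty : PySem.Set String))).1

-- pass 3: the result comprehension with the two per-key counts
def adaptive_coeff_and_weigth_alt (coeff_list : List (List (String × String))) : List (String × List Int) :=
  let events := pvEvents coeff_list
  (pvOrder events).map (fun k =>
    (k, [((events.filter (fun e => e.1 == k && e.2 == some 0)).length : Int),
         ((events.filter (fun e => e.1 == k && e.2 == some 1)).length : Int)]))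

-- ===== PRECONDITION & SPEC =====
def Spec_adaptive_coeff_and_weigth (coeff_list : List (List (String × String))) (out : List (String × List Int)) : Prop := out = adaptive_coeff_and_weigth_alt coeff_list
instance (coeff_list : List (List (String × String))) (out : List (String × List Int)) : Decidable (Spec_adaptive_coeff_and_weigth coeff_list out) := by unfold Spec_adaptive_coeff_and_weigth; infer_instance

-- ===== CLAIM (what is proved, stated in full; the proofs are below) =====
def Claim_equal_adaptive_coeff_and_weigth : Prop := ∀ (coeff_list : List (List (String × String))), Dom_adaptive_coeff_and_weigth coeff_list → Spec_adaptive_coeff_and_weigth coeff_list (adaptive_coeff_and_weigth coeff_list)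

-- ===== LEMMAS AND PROOFS =====

-- proof-only definitions -----------------------------------------------------

-- one aggregation step on the shared dict, for one event (prefix-key, axis)
def pvApply (wd : PySem.Dict String (Int × Int)) (e : String × Option Int) :
    PySem.Dict String (Int × Int) :=
  let wd1 := wd.setdefault e.1 (0, 0)
  match e.2 with
  | some ax => wd1.modify e.1 (0, 0) (fun p => if ax = 0 then (p.1 + 1, p.2) else (p.1, p.2 + 1))
  | none => wd1

-- the event list generated by one value list, starting from prefix p
def pvEvFrom : List String → String → List (String × Option Int)
  | [], _ => []
  | v :: vs, p => (p, pvAXIS.get? v) :: pvEvFrom vs (p ++ pvNUM.getD v "")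

def pvEv (cf : List (String × String)) : List (String × Option Int) :=
  pvEvFrom (PySem.Dict.ofList cf).values ""

def pvOrdStep (acc : List String) (e : String × Option Int) : List String :=
  if e.1 ≠ "" ∧ PySem.Set.contains acc e.1 = false then acc ++ [e.1] else acc

def pvOrd (E : List (String × Option Int)) : List String :=
  E.foldl pvOrdStep []

def pvCnt (E : List (String × Option Int)) (k : String) (a : Int) : Int :=
  ((E.filter (fun e => e.1 == k && e.2 == some a)).length : Int)

def pvRepr (E : List (String × Option Int)) : List (String × (Int × Int)) :=
  (pvOrd E).map (fun k => (k, (pvCnt E k 0, pvCnt E k 1)))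

def pvPhi (wd : PySem.Dict String (Int × Int)) : List (String × (Int × Int)) :=
  wd.items.filter (fun p => !(p.1 == ""))

def pvInc (ax? : Option Int) (c : Int × Int) : Int × Int :=
  match ax? with
  | some ax => if ax = 0 then (c.1 + 1, c.2) else (c.1, c.2 + 1)
  | none => c

def pvPrefs : List String → String → List String
  | [], _ => []
  | v :: vs, p => p :: pvPrefs vs (p ++ pvNUM.getD v "")

def pvAxOk (e : String × Option Int) : Prop :=
  e.2 = none ∨ e.2 = some 0 ∨ e.2 = some 1

-- literal-dict lookups -------------------------------------------------------

lemma pvAXIS_get (v : String) :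
    pvAXIS.get? v = if v = "P_Z" then some 0 else if v = "P_X" then some 1 else none := by
  have h : pvAXIS = PySem.Dict.mk [("P_Z", (0 : Int)), ("P_X", 1)] := by decide
  by_cases h1 : v = "P_Z"
  · subst h1; decide
  · by_cases h2 : v = "P_X"
    · subst h2; decide
    · rw [h]
      simp [PySem.Dict.get?, Ne.symm h1, Ne.symm h2, h1, h2]

lemma pvNUM_getD (v : String) :
    pvNUM.getD v "" = if v = "P_S" then "1" else if v = "P_X" then "2"
      else if v = "P_Z" then "3" else if v = "P_L" then "4" else "" := by
  have h : pvNUM = PySem.Dict.mk [("P_S", "1"), ("P_X", "2"), ("P_Z", "3"), ("P_L", "4")] := by decide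
  by_cases h1 : v = "P_S"
  · subst h1; decide
  · by_cases h2 : v = "P_X"
    · subst h2; decide
    · by_cases h3 : v = "P_Z"
      · subst h3; decide
      · by_cases h4 : v = "P_L"
        · subst h4; decide
        · rw [h]
          simp [PySem.Dict.getD, PySem.Dict.get?,
            Ne.symm h1, Ne.symm h2, Ne.symm h3, Ne.symm h4, h1, h2, h3, h4]

lemma pvAXIS_cases (v : String) :
    pvAXIS.get? v = none ∨ pvAXIS.get? v = some 0 ∨ pvAXIS.get? v = some 1 := by
  rw [pvAXIS_get]
  by_cases h1 : v = "P_Z" <;> by_cases h2 : v = "P_X" <;> simp [h1, h2]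

-- stage 1: A's interleaved scan is the event fold -----------------------------

lemma pv_ifcontains_eq_setdefault (wd : PySem.Dict String (Int × Int)) (s : String) :
    (if wd.contains s then wd else wd.insert s (0, 0)) = wd.setdefault s (0, 0) := by
  cases h : wd.contains s
  · simp [PySem.Dict.setdefault_of_not_contains wd (0,0) h]
  · simp [PySem.Dict.setdefault_of_contains wd (0,0) h]

lemma pvJoin_append (qbit : List Int) (n : Int) :
    pvJoin (qbit ++ [n]) = pvJoin qbit ++ PySem.Int.toStr n := by
  simp [pvJoin, List.foldl_append]

lemma pv_stepA (wd : PySem.Dict String (Int × Int)) (qbit : List Int) (v : String) :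
    (pvAStep (wd, qbit) v).1 = pvApply wd (pvJoin qbit, pvAXIS.get? v) ∧
    pvJoin (pvAStep (wd, qbit) v).2 = pvJoin qbit ++ pvNUM.getD v "" := by
  rw [pvAXIS_get, pvNUM_getD]
  by_cases h1 : v = "P_S"
  · subst h1
    exact ⟨by simp [pvAStep, pvApply, pv_ifcontains_eq_setdefault],
           by simp [pvAStep, pvJoin_append, show PySem.Int.toStr 1 = "1" from by decide]⟩
  · by_cases h2 : v = "P_X"
    · subst h2
      exact ⟨by simp [pvAStep, pvApply, pv_ifcontains_eq_setdefault],
             by simp [pvAStep, pvJoin_append, show PySem.Int.toStr 2 = "2" from by decide]⟩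
    · by_cases h3 : v = "P_Z"
      · subst h3
        exact ⟨by simp [pvAStep, pvApply, pv_ifcontains_eq_setdefault],
               by simp [pvAStep, pvJoin_append, show PySem.Int.toStr 3 = "3" from by decide]⟩
      · by_cases h4 : v = "P_L"
        · subst h4
          exact ⟨by simp [pvAStep, pvApply, pv_ifcontains_eq_setdefault],
                 by simp [pvAStep, pvJoin_append, show PySem.Int.toStr 4 = "4" from by decide]⟩
        · exact ⟨by simp [pvAStep, pvApply, h1, h2, h3, h4, pv_ifcontains_eq_setdefault],
                 by simp [pvAStep, h1, h2, h3, h4]⟩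

lemma pv_coreA (vals : List String) :
    ∀ (wd : PySem.Dict String (Int × Int)) (qbit : List Int) (p : String), p = pvJoin qbit →
      (vals.foldl pvAStep (wd, qbit)).1 = (pvEvFrom vals p).foldl pvApply wd := by
  induction vals with
  | nil => intro wd qbit p _; simp [pvEvFrom]
  | cons v vs ih =>
    intro wd qbit p hp
    subst hp
    simp only [List.foldl_cons, pvEvFrom]
    obtain ⟨h1, h2⟩ := pv_stepA wd qbit v
    have hpair : pvAStep (wd, qbit) v
        = (pvApply wd (pvJoin qbit, pvAXIS.get? v), (pvAStep (wd, qbit) v).2) := by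
      rw [← h1]
    rw [hpair]
    exact ih _ _ _ h2.symm

lemma pv_innerA (cf : List (String × String)) (wd : PySem.Dict String (Int × Int)) :
    ((PySem.Dict.ofList cf).keys.foldl
        (fun st key => pvAStep st ((PySem.Dict.ofList cf).getD key "")) (wd, ([] : List Int))).1 =
    (pvEv cf).foldl pvApply wd := by
  set d := PySem.Dict.ofList cf with hd
  have hnd : d.keys.Nodup := PySem.Dict.nodup_keys_ofList cf
  have hv := PySem.Dict.values_eq_map_keys d hnd ""
  have h := pv_coreA (d.keys.map (fun k => d.getD k "")) wd [] "" rfl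
  unfold pvEv
  rw [← hd, hv]
  simp only [List.foldl_map] at h
  exact h

-- facts about pvOrd / pvCnt ---------------------------------------------------

lemma pv_contains_mem (l : List String) (k : String) :
    PySem.Set.contains l k = true ↔ k ∈ l := by
  simp [PySem.Set.contains]

lemma pv_ordF_mono (E : List (String × Option Int)) :
    ∀ (acc : List String) (x : String), x ∈ acc → x ∈ E.foldl pvOrdStep acc := by
  induction E with
  | nil => intro acc x h; simpa using h
  | cons e E ih =>
    intro acc x h
    simp only [List.foldl_cons]
    apply ih
    unfold pvOrdStep
    split
    · exact List.mem_append_left _ h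
    · exact h

lemma pv_ordF_ne (E : List (String × Option Int)) :
    ∀ (acc : List String), (∀ x ∈ acc, x ≠ "") → ∀ x ∈ E.foldl pvOrdStep acc, x ≠ "" := by
  induction E with
  | nil => intro acc h x hx; exact h x (by simpa using hx)
  | cons e E ih =>
    intro acc h
    simp only [List.foldl_cons]
    apply ih
    unfold pvOrdStep
    split
    · next hc =>
      intro x hx
      rcases List.mem_append.mp hx with h' | h'
      · exact h x h'
      · simp only [List.mem_singleton] at h'
        subst h'
        exact hc.1
    · exact h

lemma pv_ord_ne (E : List (String × Option Int)) : ∀ x ∈ pvOrd E, x ≠ "" :=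
  pv_ordF_ne E [] (by simp)

lemma pv_ord_complete (E : List (String × Option Int)) :
    ∀ (acc : List String) (k : String) (ax : Option Int),
      (k, ax) ∈ E → k ≠ "" → k ∈ E.foldl pvOrdStep acc := by
  induction E with
  | nil => intro _ _ _ h; cases h
  | cons e E ih =>
    intro acc k ax hmem hk
    simp only [List.foldl_cons]
    rcases List.mem_cons.mp hmem with h | h
    · subst h
      apply pv_ordF_mono
      unfold pvOrdStep
      split
      · exact List.mem_append_right _ (by simp)
      · next hc =>
        push_neg at hc
        have := hc hk
        simp only [Bool.not_eq_false] at this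
        exact (pv_contains_mem acc k).mp this
    · exact ih _ k ax h hk

lemma pv_ord_append (E : List (String × Option Int)) (e : String × Option Int) :
    pvOrd (E ++ [e]) = pvOrdStep (pvOrd E) e := by
  simp [pvOrd, List.foldl_append]

lemma pv_cnt_append (E : List (String × Option Int)) (e : String × Option Int) (k : String) (a : Int) :
    pvCnt (E ++ [e]) k a = pvCnt E k a + (if e.1 = k ∧ e.2 = some a then 1 else 0) := by
  by_cases h1 : e.1 = k <;> by_cases h2 : e.2 = some a <;>
    simp [pvCnt, List.filter_append, h1, h2]

lemma pv_cnt_zero (E : List (String × Option Int)) (k : String) (a : Int)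
    (hk : k ≠ "") (h : k ∉ pvOrd E) : pvCnt E k a = 0 := by
  have hnil : E.filter (fun e => e.1 == k && e.2 == some a) = [] := by
    rw [List.filter_eq_nil_iff]
    intro e he hpe
    simp only [Bool.and_eq_true, beq_iff_eq] at hpe
    apply h
    have hmem : (k, e.2) ∈ E := by rw [← hpe.1]; exact he
    exact pv_ord_complete E [] k e.2 hmem hk
  simp [pvCnt, hnil]

-- pvRepr under appending one event --------------------------------------------

lemma pv_repr_append_empty (E : List (String × Option Int)) (ax? : Option Int) :
    pvRepr (E ++ [("", ax?)]) = pvRepr E := by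
  unfold pvRepr
  rw [pv_ord_append]
  have hstep : pvOrdStep (pvOrd E) ("", ax?) = pvOrd E := by simp [pvOrdStep]
  rw [hstep]
  apply List.map_congr_left
  intro x hx
  have hx' : x ≠ "" := pv_ord_ne E x hx
  rw [pv_cnt_append, pv_cnt_append, if_neg (by rintro ⟨h, -⟩; exact hx' h.symm),
    if_neg (by rintro ⟨h, -⟩; exact hx' h.symm)]
  simp

lemma pv_repr_append_mem (E : List (String × Option Int)) (k : String) (ax? : Option Int)
    (hax : pvAxOk (k, ax?)) (hm : k ∈ pvOrd E) :
    pvRepr (E ++ [(k, ax?)]) =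
      (pvRepr E).map (fun p => if p.1 == k then (k, pvInc ax? p.2) else p) := by
  unfold pvRepr
  rw [pv_ord_append]
  have hstep : pvOrdStep (pvOrd E) (k, ax?) = pvOrd E := by
    unfold pvOrdStep
    rw [if_neg]
    rintro ⟨-, hc⟩
    rw [(pv_contains_mem (pvOrd E) k).mpr hm] at hc
    exact absurd hc (by simp)
  rw [hstep, List.map_map]
  apply List.map_congr_left
  intro x hx
  simp only [Function.comp]
  by_cases hxk : x = k
  · subst hxk
    rw [if_pos (by simp)]
    rw [pv_cnt_append, pv_cnt_append]
    rcases hax with h | h | h <;> simp only at h <;> subst h <;> simp [pvInc]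
  · rw [if_neg (by simpa using hxk)]
    rw [pv_cnt_append, pv_cnt_append,
      if_neg (by rintro ⟨h, -⟩; exact hxk h.symm),
      if_neg (by rintro ⟨h, -⟩; exact hxk h.symm)]
    simp

lemma pv_repr_append_new (E : List (String × Option Int)) (k : String) (ax? : Option Int)
    (hk : k ≠ "") (hax : pvAxOk (k, ax?)) (hm : k ∉ pvOrd E) :
    pvRepr (E ++ [(k, ax?)]) = pvRepr E ++ [(k, pvInc ax? (0, 0))] := by
  unfold pvRepr
  rw [pv_ord_append]
  have hstep : pvOrdStep (pvOrd E) (k, ax?) = pvOrd E ++ [k] := by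
    unfold pvOrdStep
    rw [if_pos]
    refine ⟨hk, ?_⟩
    cases hc : PySem.Set.contains (pvOrd E) k
    · rfl
    · exact absurd ((pv_contains_mem (pvOrd E) k).mp hc) hm
  rw [hstep, List.map_append]
  congr 1
  · apply List.map_congr_left
    intro x hx
    have hxk : x ≠ k := fun h => hm (h ▸ hx)
    rw [pv_cnt_append, pv_cnt_append,
      if_neg (by rintro ⟨h, -⟩; exact hxk h.symm),
      if_neg (by rintro ⟨h, -⟩; exact hxk h.symm)]
    simp
  · have hz0 := pv_cnt_zero E k 0 hk hm
    have hz1 := pv_cnt_zero E k 1 hk hm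
    rw [List.map_singleton, pv_cnt_append, pv_cnt_append, hz0, hz1]
    rcases hax with h | h | h <;> simp only at h <;> subst h <;> simp [pvInc]

-- moving pvPhi through the dict operations ------------------------------------

lemma pv_filter_map_overwrite (l : List (String × (Int × Int))) (k : String) (v : Int × Int)
    (hk : k ≠ "") :
    (l.map (fun p => if p.1 == k then (k, v) else p)).filter (fun p => !(p.1 == "")) =
      (l.filter (fun p => !(p.1 == ""))).map (fun p => if p.1 == k then (k, v) else p) := by
  induction l with
  | nil => rfl
  | cons p l ih =>
    by_cases hpk : p.1 = k
    · simpa [hpk, hk] using ih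
    · by_cases hpe : p.1 = ""
      · simpa [hpe, Ne.symm hk] using ih
      · simpa [hpk, hpe] using ih

lemma pv_filter_map_empty (l : List (String × (Int × Int))) (v : Int × Int) :
    (l.map (fun p => if p.1 == "" then ("", v) else p)).filter (fun p => !(p.1 == "")) =
      l.filter (fun p => !(p.1 == "")) := by
  induction l with
  | nil => rfl
  | cons p l ih =>
    by_cases hpe : p.1 = ""
    · simpa [hpe] using ih
    · simpa [hpe] using ih

lemma pv_find_filter (l : List (String × (Int × Int))) (k : String) (hk : k ≠ "") :
    (l.filter (fun p => !(p.1 == ""))).find? (fun p => p.1 == k) =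
      l.find? (fun p => p.1 == k) := by
  induction l with
  | nil => rfl
  | cons p l ih =>
    by_cases hpk : p.1 = k
    · simp [List.find?_cons, hpk, hk, Ne.symm hk]
    · by_cases hpe : p.1 = ""
      · simpa [List.find?_cons, hpe, Ne.symm hk, hpk] using ih
      · simpa [List.find?_cons, hpk, hpe] using ih

lemma pv_find_self (l : List String) (k : String) (h : k ∈ l) :
    l.find? (fun x => x == k) = some k := by
  induction l with
  | nil => cases h
  | cons a l ih =>
    cases hb : a == k
    · have hmem : k ∈ l := by
        rcases List.mem_cons.mp h with h' | h'
        · exact absurd h'.symm (by simpa using hb)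
        · exact h'
      simpa [hb] using ih hmem
    · have ha : a = k := eq_of_beq hb
      subst ha
      simp

lemma pv_contains_phi (wd : PySem.Dict String (Int × Int)) (k : String) (hk : k ≠ "") :
    wd.contains k = (pvPhi wd).any (fun p => p.1 == k) := by
  rw [Bool.eq_iff_iff]
  unfold pvPhi
  simp only [PySem.Dict.contains, List.any_eq_true, List.mem_filter, beq_iff_eq]
  constructor
  · rintro ⟨p, hp, hpk⟩
    exact ⟨p, ⟨hp, by rw [hpk]; simpa using hk⟩, hpk⟩
  · rintro ⟨p, ⟨hp, -⟩, hpk⟩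
    exact ⟨p, hp, hpk⟩

lemma pv_any_repr (E : List (String × Option Int)) (k : String) :
    ((pvRepr E).any (fun p => p.1 == k)) = decide (k ∈ pvOrd E) := by
  rw [Bool.eq_iff_iff]
  unfold pvRepr
  simp [List.any_eq_true]

lemma pv_getD_repr (wd : PySem.Dict String (Int × Int)) (E : List (String × Option Int))
    (k : String) (hk : k ≠ "") (h : pvPhi wd = pvRepr E) (hm : k ∈ pvOrd E) :
    wd.getD k (0, 0) = (pvCnt E k 0, pvCnt E k 1) := by
  have hfind : wd.items.find? (fun p => p.1 == k) = some (k, (pvCnt E k 0, pvCnt E k 1)) := by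
    rw [← pv_find_filter wd.items k hk]
    have hphi : wd.items.filter (fun p => !(p.1 == "")) = pvRepr E := h
    rw [hphi]
    unfold pvRepr
    rw [List.find?_map]
    have hcomp : ((fun p : String × (Int × Int) => p.1 == k) ∘
        (fun x => (x, (pvCnt E x 0, pvCnt E x 1)))) = fun x => x == k := rfl
    rw [hcomp, pv_find_self (pvOrd E) k hm]
    rfl
  simp [PySem.Dict.getD, PySem.Dict.get?, hfind]

lemma pv_phi_erase (wd : PySem.Dict String (Int × Int)) :
    (wd.erase "").items = pvPhi wd := rfl

lemma pv_filter_repr (E : List (String × Option Int)) :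
    (pvRepr E).filter (fun p => !(p.1 == "")) = pvRepr E := by
  rw [List.filter_eq_self]
  intro p hp
  unfold pvRepr at hp
  rcases List.mem_map.mp hp with ⟨x, hx, hxp⟩
  have hxn := pv_ord_ne E x hx
  subst hxp
  simpa using hxn

-- the one-event step ----------------------------------------------------------

lemma pv_stepR (wd : PySem.Dict String (Int × Int)) (E : List (String × Option Int))
    (e : String × Option Int) (hax : pvAxOk e) (h : pvPhi wd = pvRepr E) :
    pvPhi (pvApply wd e) = pvRepr (E ++ [e]) := by
  obtain ⟨k, ax?⟩ := e
  by_cases hk : k = ""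
  · subst hk
    rw [pv_repr_append_empty, ← h]
    unfold pvApply
    have hsd : pvPhi (wd.setdefault "" (0, 0)) = pvPhi wd := by
      unfold PySem.Dict.setdefault
      split
      · rfl
      · unfold pvPhi
        simp [List.filter_append]
    cases ax? with
    | none => simpa using hsd
    | some ax =>
      simp only
      have hc : (wd.setdefault "" (0, 0)).contains "" = true := by
        rw [PySem.Dict.contains_setdefault]
        simp
      unfold PySem.Dict.modify PySem.Dict.insert
      rw [if_pos hc]
      unfold pvPhi
      simp only
      rw [pv_filter_map_empty]
      exact hsd
  · -- k ≠ ""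
    have hcont : wd.contains k = decide (k ∈ pvOrd E) := by
      rw [pv_contains_phi wd k hk, h, pv_any_repr]
    by_cases hm : k ∈ pvOrd E
    · -- existing key: setdefault is a no-op
      have hc : wd.contains k = true := by rw [hcont]; simpa using hm
      have hsd : wd.setdefault k (0, 0) = wd := PySem.Dict.setdefault_of_contains wd (0, 0) hc
      rw [pv_repr_append_mem E k ax? hax hm, ← h]
      unfold pvApply
      cases ax? with
      | none =>
        simp only [hsd]
        rw [h]
        symm
        calc (pvRepr E).map (fun p => if p.1 == k then (k, pvInc none p.2) else p)
            = (pvRepr E).map id := by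
              apply List.map_congr_left
              intro p _
              by_cases hpk : p.1 = k
              · simp [pvInc, ← hpk]
              · simp [hpk]
          _ = pvRepr E := List.map_id _
      | some ax =>
        simp only [hsd]
        have hget : wd.getD k (0, 0) = (pvCnt E k 0, pvCnt E k 1) := pv_getD_repr wd E k hk h hm
        unfold PySem.Dict.modify PySem.Dict.insert
        rw [if_pos hc]
        unfold pvPhi
        simp only
        rw [pv_filter_map_overwrite _ _ _ hk]
        have hphi : wd.items.filter (fun p => !(p.1 == "")) = pvRepr E := h
        rw [hphi]
        unfold pvRepr
        rw [List.map_map, List.map_map]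
        apply List.map_congr_left
        intro x hx
        simp only [Function.comp]
        by_cases hxk : x = k
        · subst hxk
          rw [if_pos (by simp : (x == x) = true), hget,
            if_pos (by simp : (x == x) = true)]
          rfl
        · rw [if_neg (by simpa using hxk), if_neg (by simpa using hxk)]
    · -- new key: setdefault appends (k, (0,0))
      have hc : wd.contains k = false := by rw [hcont]; simpa using hm
      have hsd : wd.setdefault k (0, 0) = wd.insert k (0, 0) :=
        PySem.Dict.setdefault_of_not_contains wd (0, 0) hc
      have hit : (wd.insert k (0, 0)).items = wd.items ++ [(k, (0, 0))] :=
        PySem.Dict.items_insert_of_not_contains wd (0, 0) hc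
      rw [pv_repr_append_new E k ax? hk hax hm, ← h]
      unfold pvApply
      cases ax? with
      | none =>
        simp only [hsd]
        unfold pvPhi
        rw [hit, List.filter_append]
        simp [pvInc, hk]
      | some ax =>
        simp only [hsd]
        have hc1 : (wd.insert k (0, 0)).contains k = true :=
          PySem.Dict.contains_insert_self _ _ _
        have hget : (wd.insert k (0, 0)).getD k (0, 0) = (0, 0) := by
          rw [PySem.Dict.getD_insert_self]
        have hmod : (wd.insert k (0, 0)).modify k (0, 0)
              (fun p => if ax = 0 then (p.1 + 1, p.2) else (p.1, p.2 + 1))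
            = (wd.insert k (0, 0)).insert k
                ((fun p : Int × Int => if ax = 0 then (p.1 + 1, p.2) else (p.1, p.2 + 1)) (0, 0)) := by
          unfold PySem.Dict.modify
          rw [hget]
        rw [hmod]
        have hit2 := PySem.Dict.items_insert_of_contains (wd.insert k (0, 0))
          ((fun p : Int × Int => if ax = 0 then (p.1 + 1, p.2) else (p.1, p.2 + 1)) (0, 0)) hc1
        unfold pvPhi
        rw [hit2, hit, pv_filter_map_overwrite _ _ _ hk, List.filter_append]
        have hone : (([((k : String), ((0 : Int), (0 : Int)))]).filter (fun p => !(p.1 == ""))) =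
            [(k, ((0 : Int), (0 : Int)))] := by simp [hk]
        rw [hone, List.map_append]
        congr 1
        · have hphi : wd.items.filter (fun p => !(p.1 == "")) = pvRepr E := h
          rw [hphi]
          unfold pvRepr
          rw [List.map_map]
          apply List.map_congr_left
          intro x hx
          have hxk : x ≠ k := fun hh => hm (hh ▸ hx)
          simp only [Function.comp]
          rw [if_neg (by simpa using hxk)]
        · simp [pvInc]

-- folding a whole event list --------------------------------------------------

lemma pv_fold_apply (F : List (String × Option Int)) :
    ∀ (E : List (String × Option Int)) (wd : PySem.Dict String (Int × Int)),
      (∀ e ∈ F, pvAxOk e) → pvPhi wd = pvRepr E →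
      pvPhi (F.foldl pvApply wd) = pvRepr (E ++ F) := by
  induction F with
  | nil => intro E wd _ h; simpa using h
  | cons e F ih =>
    intro E wd hax h
    simp only [List.foldl_cons]
    have h1 : pvPhi (pvApply wd e) = pvRepr (E ++ [e]) :=
      pv_stepR wd E e (hax e (by simp)) h
    have h2 := ih (E ++ [e]) (pvApply wd e) (fun e' he' => hax e' (by simp [he'])) h1
    rw [h2, List.append_assoc]
    rfl

lemma pv_ax_evFrom (vals : List String) :
    ∀ (p : String) (e : String × Option Int), e ∈ pvEvFrom vals p → pvAxOk e := by
  induction vals with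
  | nil => intro p e h; cases h
  | cons v vs ih =>
    intro p e h
    rcases List.mem_cons.mp h with h' | h'
    · subst h'
      exact pvAXIS_cases v
    · exact ih _ e h'

-- the outer fold --------------------------------------------------------------

lemma pv_outer (cfs : List (List (String × String))) :
    ∀ (E : List (String × Option Int)) (wd : PySem.Dict String (Int × Int)),
      wd.items = pvRepr E →
      (cfs.foldl (fun wd cf =>
        let d := PySem.Dict.ofList cf
        let st := d.keys.foldl (fun st key => pvAStep st (d.getD key "")) (wd, ([] : List Int))
        st.1.erase "") wd).items = pvRepr (E ++ cfs.flatMap pvEv) := by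
  induction cfs with
  | nil => intro E wd h; simpa using h
  | cons cf cfs ih =>
    intro E wd h
    simp only [List.foldl_cons]
    have hphi : pvPhi wd = pvRepr E := by
      unfold pvPhi
      rw [h]
      exact pv_filter_repr E
    have hinner : ((((PySem.Dict.ofList cf).keys.foldl
        (fun st key => pvAStep st ((PySem.Dict.ofList cf).getD key "")) (wd, ([] : List Int))).1).erase
          "").items = pvRepr (E ++ pvEv cf) := by
      rw [pv_phi_erase, pv_innerA cf wd]
      exact pv_fold_apply (pvEv cf) E wd (fun e he => pv_ax_evFrom _ _ e he) hphi
    have hrec := ih (E ++ pvEv cf) _ hinner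
    rw [hrec]
    simp [List.flatMap_cons, List.append_assoc]

-- normalizing B's event construction ------------------------------------------

lemma pv_prefs_fold (vals : List String) :
    ∀ (acc : List String) (p : String),
      (vals.foldl (fun (st : List String × String) v =>
        (st.1 ++ [st.2], st.2 ++ pvNUM.getD v "")) (acc, p)).1 = acc ++ pvPrefs vals p := by
  induction vals with
  | nil => intro acc p; simp [pvPrefs]
  | cons v vs ih =>
    intro acc p
    simp only [List.foldl_cons, pvPrefs]
    rw [ih]
    simp

lemma pv_zip_ev (vals : List String) :
    ∀ (p : String), (pvPrefs vals p).zip (vals.map pvAXIS.get?) = pvEvFrom vals p := by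
  induction vals with
  | nil => intro p; rfl
  | cons v vs ih =>
    intro p
    simp only [pvPrefs, List.map_cons, List.zip_cons_cons, pvEvFrom]
    rw [ih]

lemma pv_events_eq (cl : List (List (String × String))) :
    pvEvents cl = cl.flatMap pvEv := by
  have key : ∀ (cfs : List (List (String × String))) (acc : List (String × Option Int)),
      cfs.foldl (fun ev cf =>
        let vals := (PySem.Dict.ofList cf).values
        let pr := vals.foldl (fun (st : List String × String) v =>
            (st.1 ++ [st.2], st.2 ++ pvNUM.getD v "")) (([] : List String), "")
        ev ++ pr.1.zip (vals.map pvAXIS.get?)) acc = acc ++ cfs.flatMap pvEv := by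
    intro cfs
    induction cfs with
    | nil => intro acc; simp
    | cons cf cfs ih =>
      intro acc
      simp only [List.foldl_cons]
      rw [ih, pv_prefs_fold, List.nil_append, pv_zip_ev]
      simp [pvEv, List.flatMap_cons, List.append_assoc]
  exact (key cl []).trans (List.nil_append _)

lemma pv_order_eq (E : List (String × Option Int)) : pvOrder E = pvOrd E := by
  have h : ∀ (F : List (String × Option Int)) (l : List String),
      F.foldl (fun (st : List String × PySem.Set String) e =>
        if e.1 ≠ "" ∧ PySem.Set.contains st.2 e.1 = false then
          (st.1 ++ [e.1], PySem.Set.add st.2 e.1)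
        else st) (l, l)
      = (F.foldl pvOrdStep l, F.foldl pvOrdStep l) := by
    intro F
    induction F with
    | nil => intro l; rfl
    | cons e F ih =>
      intro l
      simp only [List.foldl_cons]
      by_cases hc : e.1 ≠ "" ∧ PySem.Set.contains l e.1 = false
      · rw [if_pos hc]
        have hadd : PySem.Set.add l e.1 = l ++ [e.1] := by
          have hne : ¬ (PySem.Set.contains l e.1 = true) := by
            rw [hc.2]; simp
          unfold PySem.Set.add
          rw [if_neg hne]
        have hstep : pvOrdStep l e = l ++ [e.1] := by
          unfold pvOrdStep
          rw [if_pos hc]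
        rw [hadd, hstep]
        exact ih _
      · rw [if_neg hc]
        have hstep : pvOrdStep l e = l := by
          unfold pvOrdStep
          rw [if_neg hc]
        rw [hstep]
        exact ih _
  unfold pvOrder pvOrd
  exact congrArg Prod.fst (h E [])

-- ===== VERDICT (by name: the statement is the Claim_ definition above) =====
theorem adaptive_coeff_and_weigth_spec : Claim_equal_adaptive_coeff_and_weigth := by
  unfold Claim_equal_adaptive_coeff_and_weigth
  intro cl _
  unfold Spec_adaptive_coeff_and_weigth
  unfold adaptive_coeff_and_weigth adaptive_coeff_and_weigth_alt
  simp only []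
  have hA := pv_outer cl [] PySem.Dict.empty rfl
  rw [hA]
  rw [pv_events_eq, pv_order_eq]
  simp only [List.nil_append]
  unfold pvRepr
  rw [List.map_map]
  apply List.map_congr_left
  intro x _
  rfl
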